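-- pv_equiv track=rewrite | github.com/anne-mart/CISC-131 | Anne_Martin_lab4.py | FindDarn
-- ===== SOURCE A (Python) =====
-- def FindDarn (phrase): #finding darn
--     index = 0
--     has_darn = False
--     while (index < len(phrase) and (has_darn == False)):
--
--
--         if len(phrase) <= index + 3:
--             has_darn = False
--
--         else:
--             char1 = phrase[index]
--             char2 = phrase[index + 1]
--             char3 = phrase[index + 2]
--             char4 = phrase[index + 3]
--
--             test_string = char1 + char2 + char3 + char4
--
--             if index == 0:
--                 if test_string =="darn":
--                     has_darn = True
--                     if len(phrase) > index + 4: #lengths start at 1 and indexes start at 0, so have to add -1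
--                        if phrase[index+4] != chr(32):
--                             has_darn = False
--
--             else:
--                 if test_string =="darn" and (phrase[index-1]) == chr(32):
--                     has_darn = True
--                     if len(phrase) > index + 4:
--                        if phrase[index+4] != chr(32):
--                             has_darn = False
--
--         index = index +1
--
--     return has_darn
-- ===== SOURCE B (Python) =====
-- def FindDarn(phrase):
--     return "darn" in phrase.split(" ")
-- ===== Notes on version B (the rewrite author's own statement) =====
-- stated objective: idiomatic
-- what changed: A's index-by-index while loop with manual 4-character window and space-boundary checks is replaced by splitting the phrase on the literal space character and testing membership of the token 'darn'.
import Mathlib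
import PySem

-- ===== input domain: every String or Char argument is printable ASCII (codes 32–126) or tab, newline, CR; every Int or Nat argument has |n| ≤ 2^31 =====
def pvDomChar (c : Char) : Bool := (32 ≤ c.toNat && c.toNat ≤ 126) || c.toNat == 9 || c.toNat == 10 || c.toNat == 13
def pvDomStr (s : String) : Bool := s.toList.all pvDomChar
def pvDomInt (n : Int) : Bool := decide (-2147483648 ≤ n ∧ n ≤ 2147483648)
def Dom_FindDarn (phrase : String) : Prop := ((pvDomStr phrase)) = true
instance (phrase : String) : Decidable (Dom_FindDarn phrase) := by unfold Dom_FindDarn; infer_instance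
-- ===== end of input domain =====

-- B replaces A's index-by-index boundary scan by splitting the phrase on single spaces
-- and testing list membership of the token "darn" (objective: simpler/idiomatic).

-- ===== PORT A =====
-- literal port of A's while loop: `index` and the `has_darn` flag are the loop state;
-- phrase[k] is ported as PySem.List.pyGetD on the character list (every access is guarded in range)
def FindDarnLoop (cs : List Char) (index : Nat) (has_darn : Bool) : Bool :=
  if h : index < cs.length ∧ has_darn = false then
    let has_darn' :=
      if cs.length ≤ index + 3 then false
      else
        let char1 := PySem.List.pyGetD cs ((index : Nat) : Int) ' '
        let char2 := PySem.List.pyGetD cs ((index + 1 : Nat) : Int) ' '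
        let char3 := PySem.List.pyGetD cs ((index + 2 : Nat) : Int) ' '
        let char4 := PySem.List.pyGetD cs ((index + 3 : Nat) : Int) ' '
        let test_string := [char1, char2, char3, char4]
        if index = 0 then
          if test_string = ['d', 'a', 'r', 'n'] then
            if index + 4 < cs.length then
              if PySem.List.pyGetD cs ((index + 4 : Nat) : Int) ' ' ≠ ' ' then false else true
            else true
          else false
        else
          if test_string = ['d', 'a', 'r', 'n'] ∧ PySem.List.pyGetD cs ((index - 1 : Nat) : Int) ' ' = ' ' then
            if index + 4 < cs.length then
              if PySem.List.pyGetD cs ((index + 4 : Nat) : Int) ' ' ≠ ' ' then false else true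
            else true
          else false
    FindDarnLoop cs (index + 1) has_darn'
  else has_darn
termination_by cs.length - index
decreasing_by omega

def FindDarn (phrase : String) : Bool :=
  FindDarnLoop phrase.toList 0 false

-- ===== PORT B =====
-- literal port of Source B:  return "darn" in phrase.split(" ")
def FindDarn_alt (phrase : String) : Bool :=
  decide ("darn".toList ∈ PySem.Chars.splitOn phrase.toList [' '])

-- ===== PRECONDITION & SPEC =====
def Spec_FindDarn (phrase : String) (out : Bool) : Prop := out = FindDarn_alt phrase
instance (phrase : String) (out : Bool) : Decidable (Spec_FindDarn phrase out) := by unfold Spec_FindDarn; infer_instance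

-- ===== CLAIM (what is proved, stated in full; the proofs are below) =====
def Claim_equal_FindDarn : Prop := ∀ (phrase : String), Dom_FindDarn phrase → Spec_FindDarn phrase (FindDarn phrase)

-- ===== LEMMAS AND PROOFS =====

-- proof-side characterisation: position j starts a standalone occurrence of "darn"
def pvGood (cs : List Char) (j : Nat) : Prop :=
  j + 3 < cs.length ∧ cs.getD j ' ' = 'd' ∧ cs.getD (j+1) ' ' = 'a' ∧
  cs.getD (j+2) ' ' = 'r' ∧ cs.getD (j+3) ' ' = 'n' ∧
  (j = 0 ∨ cs.getD (j-1) ' ' = ' ') ∧ (j + 4 = cs.length ∨ cs.getD (j+4) ' ' = ' ')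

-- clean accumulator recursion equal to PySem.Chars.splitOn.go on separator [' ']
def pvTokens (cs : List Char) (cur : List Char) : List (List Char) :=
  match cs with
  | [] => [cur.reverse]
  | c :: rest => if c = ' ' then cur.reverse :: pvTokens rest [] else pvTokens rest (c :: cur)


lemma good_succ (c : Char) (rest : List Char) (k : Nat) :
    pvGood (c :: rest) (k + 1) ↔ (pvGood rest k ∧ (k = 0 → c = ' ')) := by
  cases k with
  | zero => simp [pvGood, List.getD]; tauto
  | succ m =>
    show pvGood (c :: rest) (m + 2) ↔ _
    simp [pvGood, List.getD, show m+2-1 = m+1-1+1 by omega, show m+2+1 = m+1+1+1 by omega,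
      show m+2+2 = m+1+2+1 by omega, show m+2+3 = m+1+3+1 by omega, show m+2+4 = m+1+4+1 by omega]

lemma tw_cons_iff (p : Char → Bool) (a x : Char) (l res : List Char) :
    (a :: l).takeWhile p = x :: res ↔ a = x ∧ p a = true ∧ l.takeWhile p = res := by
  rw [List.takeWhile_cons]
  by_cases h : p a <;> simp [h]

lemma word_iff (cs : List Char) :
    cs.takeWhile (· ≠ ' ') = ['d','a','r','n'] ↔ pvGood cs 0 := by
  cases cs with
  | nil => simp [pvGood]
  | cons a t1 =>
  cases t1 with
  | nil =>
    by_cases ha : a = ' ' <;> simp [pvGood, List.takeWhile, List.getD, ha]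
  | cons b t2 =>
  cases t2 with
  | nil =>
    by_cases ha : a = ' ' <;> by_cases hb : b = ' ' <;>
      simp [pvGood, List.takeWhile, List.getD, ha, hb]
  | cons c t3 =>
  cases t3 with
  | nil =>
    by_cases ha : a = ' ' <;> by_cases hb : b = ' ' <;> by_cases hc : c = ' ' <;>
      simp [pvGood, List.takeWhile, List.getD, ha, hb, hc]
  | cons d rest =>
    simp only [tw_cons_iff, List.takeWhile_eq_nil_iff]
    rcases rest with _ | ⟨e, t⟩ <;>
      simp [pvGood, List.getD] <;> aesop

lemma pvTokens_go (cs : List Char) : ∀ (fuel : Nat) (cur : List Char) (acc : List (List Char)),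
    cs.length < fuel →
    PySem.Chars.splitOn.go [' '] fuel cs cur acc = acc.reverse ++ pvTokens cs cur := by
  induction cs with
  | nil =>
    intro fuel cur acc h
    cases fuel with
    | zero => omega
    | succ f => simp [PySem.Chars.splitOn.go, pvTokens]
  | cons c rest ih =>
    intro fuel cur acc h
    cases fuel with
    | zero => omega
    | succ f =>
      rw [show PySem.Chars.splitOn.go [' '] (f+1) (c :: rest) cur acc
            = if ([' '] : List Char).isPrefixOf (c :: rest)
              then PySem.Chars.splitOn.go [' '] f ((c :: rest).drop 1) [] (cur.reverse :: acc)
              else PySem.Chars.splitOn.go [' '] f rest (c :: cur) acc from rfl]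
      by_cases hc : c = ' '
      · subst hc
        rw [if_pos (by simp [List.isPrefixOf])]
        rw [List.drop_one, List.tail_cons, ih f [] (cur.reverse :: acc) (by simp at h ⊢; omega)]
        simp [pvTokens]
      · rw [if_neg (by simp [List.isPrefixOf]; exact fun hx => hc hx.symm)]
        rw [ih f (c :: cur) acc (by simp at h ⊢; omega)]
        simp [pvTokens, hc]

lemma no_good_nil (j : Nat) : ¬ pvGood [] j := by
  intro hj; simp [pvGood] at hj

lemma tokens_mem (cs : List Char) : ∀ cur : List Char,
    (['d','a','r','n'] ∈ pvTokens cs cur) ↔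
      (cur.reverse ++ cs.takeWhile (· ≠ ' ') = ['d','a','r','n']) ∨ (∃ j, 1 ≤ j ∧ pvGood cs j) := by
  induction cs with
  | nil =>
    intro cur
    simp only [pvTokens, List.mem_singleton, List.takeWhile_nil, List.append_nil]
    constructor
    · intro h; exact Or.inl h.symm
    · rintro (h | ⟨j, _, hj⟩)
      · exact h.symm
      · exact absurd hj (no_good_nil j)
  | cons c rest ih =>
    intro cur
    by_cases hc : c = ' '
    · subst hc
      rw [show pvTokens (' ' :: rest) cur = cur.reverse :: pvTokens rest [] from by
            simp [pvTokens]]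
      rw [List.mem_cons, ih []]
      have h1 : (' ' :: rest).takeWhile (· ≠ ' ') = [] := by simp [List.takeWhile]
      have h2 : (∃ j, 1 ≤ j ∧ pvGood (' ' :: rest) j) ↔ (∃ k, pvGood rest k) := by
        constructor
        · rintro ⟨j, hj, hg⟩
          obtain ⟨k, rfl⟩ : ∃ k, j = k + 1 := ⟨j - 1, by omega⟩
          exact ⟨k, ((good_succ _ _ _).mp hg).1⟩
        · rintro ⟨k, hk⟩
          exact ⟨k + 1, by omega, (good_succ _ _ _).mpr ⟨hk, fun _ => rfl⟩⟩
      have h3 : (∃ k, pvGood rest k) ↔ (pvGood rest 0 ∨ ∃ j, 1 ≤ j ∧ pvGood rest j) := by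
        constructor
        · rintro ⟨k, hk⟩
          cases k with
          | zero => exact Or.inl hk
          | succ m => exact Or.inr ⟨m + 1, by omega, hk⟩
        · rintro (h | ⟨j, _, hj⟩)
          · exact ⟨0, h⟩
          · exact ⟨j, hj⟩
      rw [h1, h2, h3, ← word_iff]
      simp
      rw [show ((['d','a','r','n'] : List Char) = cur.reverse) ↔ (cur = ['n','r','a','d']) from by
            rw [eq_comm, List.reverse_eq_iff]
            simp]
    · simp only [pvTokens, if_neg hc]
      rw [ih (c :: cur)]
      have h1 : (c :: rest).takeWhile (· ≠ ' ') = c :: rest.takeWhile (· ≠ ' ') := by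
        simp [List.takeWhile, hc]
      have h2 : (∃ j, 1 ≤ j ∧ pvGood (c :: rest) j) ↔ (∃ j, 1 ≤ j ∧ pvGood rest j) := by
        constructor
        · rintro ⟨j, hj, hg⟩
          obtain ⟨k, rfl⟩ : ∃ k, j = k + 1 := ⟨j - 1, by omega⟩
          obtain ⟨hk, h0⟩ := (good_succ _ _ _).mp hg
          cases k with
          | zero => exact absurd (h0 rfl) hc
          | succ m => exact ⟨m + 1, by omega, hk⟩
        · rintro ⟨j, hj, hg⟩
          exact ⟨j + 1, by omega, (good_succ _ _ _).mpr ⟨hg, fun h0 => absurd h0 (by omega)⟩⟩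
      rw [h1, h2]
      simp

lemma loop_flag_true (cs : List Char) (i : Nat) : FindDarnLoop cs i true = true := by
  unfold FindDarnLoop; simp

lemma step_eq (cs : List Char) (i : Nat) (h : i < cs.length) :
    (if cs.length ≤ i + 3 then false
     else
       if i = 0 then
         if [PySem.List.pyGetD cs ((i : Nat) : Int) ' ', PySem.List.pyGetD cs ((i + 1 : Nat) : Int) ' ',
             PySem.List.pyGetD cs ((i + 2 : Nat) : Int) ' ', PySem.List.pyGetD cs ((i + 3 : Nat) : Int) ' ']
             = ['d', 'a', 'r', 'n'] then
           if i + 4 < cs.length then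
             if PySem.List.pyGetD cs ((i + 4 : Nat) : Int) ' ' ≠ ' ' then false else true
           else true
         else false
       else
         if [PySem.List.pyGetD cs ((i : Nat) : Int) ' ', PySem.List.pyGetD cs ((i + 1 : Nat) : Int) ' ',
             PySem.List.pyGetD cs ((i + 2 : Nat) : Int) ' ', PySem.List.pyGetD cs ((i + 3 : Nat) : Int) ' ']
             = ['d', 'a', 'r', 'n'] ∧ PySem.List.pyGetD cs ((i - 1 : Nat) : Int) ' ' = ' ' then
           if i + 4 < cs.length then
             if PySem.List.pyGetD cs ((i + 4 : Nat) : Int) ' ' ≠ ' ' then false else true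
           else true
         else false) = true ↔ pvGood cs i := by
  simp only [PySem.List.pyGetD_natCast]
  unfold pvGood
  split_ifs
  all_goals try simp only [List.cons.injEq, and_true, ne_eq, not_not] at *
  all_goals try simp only [false_iff, true_iff]
  all_goals
    first
      | (rintro ⟨g1, g2, g3, g4, g5, g6, g7⟩
         first
           | omega
           | tauto
           | (rcases g7 with g7 | g7
              · omega
              · tauto))
      | (refine ⟨by omega, ?_, ?_, ?_, ?_, ?_, ?_⟩ <;>
           first
             | tauto
             | exact Or.inl (by omega))

lemma loop_arg (cs : List Char) (i : Nat) (b : Bool) :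
    FindDarnLoop cs (i + 1) b = (b || FindDarnLoop cs (i + 1) false) := by
  cases b
  · rfl
  · simp [loop_flag_true]

lemma loop_step (cs : List Char) (i : Nat) (h : i < cs.length) :
    (FindDarnLoop cs i false = true ↔ (pvGood cs i ∨ FindDarnLoop cs (i + 1) false = true)) := by
  conv_lhs => rw [FindDarnLoop]
  rw [dif_pos ⟨h, rfl⟩]
  simp only []
  rw [loop_arg, Bool.or_eq_true]
  exact or_congr (step_eq cs i h) Iff.rfl

lemma loop_end (cs : List Char) (i : Nat) (h : ¬ i < cs.length) :
    (FindDarnLoop cs i false = true ↔ ∃ j, i ≤ j ∧ pvGood cs j) := by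
  rw [FindDarnLoop, dif_neg (by simp [h])]
  constructor
  · intro hF; exact absurd hF (by simp)
  · rintro ⟨j, hij, hg⟩
    exact absurd hg.1 (by omega)

lemma loop_char (cs : List Char) : ∀ (n i : Nat), cs.length - i ≤ n →
    (FindDarnLoop cs i false = true ↔ ∃ j, i ≤ j ∧ pvGood cs j) := by
  intro n
  induction n with
  | zero =>
    intro i h0
    exact loop_end cs i (by omega)
  | succ n ihn =>
    intro i hle
    by_cases hi : i < cs.length
    · rw [loop_step cs i hi, ihn (i + 1) (by omega)]
      constructor
      · rintro (hg | ⟨j, hij, hj⟩)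
        · exact ⟨i, Nat.le_refl i, hg⟩
        · exact ⟨j, by omega, hj⟩
      · rintro ⟨j, hij, hj⟩
        rcases Nat.eq_or_lt_of_le hij with rfl | hlt
        · exact Or.inl hj
        · exact Or.inr ⟨j, by omega, hj⟩
    · exact loop_end cs i hi

lemma alt_char (phrase : String) :
    FindDarn_alt phrase = true ↔ ∃ j, pvGood phrase.toList j := by
  unfold FindDarn_alt
  rw [decide_eq_true_eq]
  have hgo : PySem.Chars.splitOn phrase.toList [' '] = pvTokens phrase.toList [] := by
    rw [show PySem.Chars.splitOn phrase.toList [' ']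
          = PySem.Chars.splitOn.go [' '] (phrase.toList.length + 1) phrase.toList [] [] from rfl,
        pvTokens_go _ _ _ _ (by omega)]
    simp
  rw [hgo, show ("darn".toList : List Char) = ['d', 'a', 'r', 'n'] from rfl, tokens_mem _ []]
  simp only [List.reverse_nil, List.nil_append]
  rw [word_iff]
  constructor
  · rintro (h | ⟨j, _, hj⟩)
    · exact ⟨0, h⟩
    · exact ⟨j, hj⟩
  · rintro ⟨j, hj⟩
    cases j with
    | zero => exact Or.inl hj
    | succ m => exact Or.inr ⟨m + 1, by omega, hj⟩

theorem FindDarn_spec : Claim_equal_FindDarn := by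
  intro phrase _
  unfold Spec_FindDarn FindDarn
  rw [Bool.eq_iff_iff, loop_char phrase.toList (phrase.toList.length) 0 (by omega), alt_char]
  constructor
  · rintro ⟨j, _, hj⟩; exact ⟨j, hj⟩
  · rintro ⟨j, hj⟩; exact ⟨j, Nat.zero_le j, hj⟩
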